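-- pv_equiv track=rewrite | github.com/burd5/codewars_python | scramblies.py | scramble
-- ===== SOURCE A (Python) =====
-- def scramble(s1, s2):
--     # create dict to hold char value counts
--     dict1 = {}
--     dict2 = {}
--     # loop to add characters from bigger string to dict
--     for i in s1:
--         dict1[i] = 1 + dict1.setdefault(i, 0)
--
--     # loop through smaller string and check to see if char/val count are adequate
--     for i in s2:
--         dict2[i] = 1 + dict2.setdefault(i, 0)
--
--     # compare dict values and keys for both strings
--     for k,val in dict2.items():
--         if k not in dict1:
--             return False
--         elif val > dict1[k]:
--             return False
--
--     return True
-- ===== SOURCE B (Python) =====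
-- def scramble(s1, s2):
--     # Destructive matching: consume one occurrence of each character s2 needs
--     # from a mutable pool of s1's characters; fail as soon as one is missing.
--     pool = list(s1)
--     for c in s2:
--         try:
--             pool.remove(c)
--         except ValueError:
--             return False
--     return True
-- ===== Notes on version B (the rewrite author's own statement) =====
-- stated objective: alternative
-- what changed: Replaced A's two frequency dictionaries and the comparison loop by destructive matching: B walks s2 once and removes one occurrence of each needed character from a mutable pool of s1's characters, returning False the moment a removal fails.
import Mathlib
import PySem

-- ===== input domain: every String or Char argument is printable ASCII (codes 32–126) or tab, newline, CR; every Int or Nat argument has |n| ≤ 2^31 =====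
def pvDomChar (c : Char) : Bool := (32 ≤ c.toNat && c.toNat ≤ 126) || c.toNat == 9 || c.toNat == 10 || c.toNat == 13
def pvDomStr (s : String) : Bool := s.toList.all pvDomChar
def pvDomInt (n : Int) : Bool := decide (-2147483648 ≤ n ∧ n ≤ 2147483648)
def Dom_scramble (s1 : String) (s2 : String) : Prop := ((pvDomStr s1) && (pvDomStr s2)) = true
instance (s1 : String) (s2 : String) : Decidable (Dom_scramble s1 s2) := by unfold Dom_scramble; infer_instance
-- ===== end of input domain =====

-- B replaces A's two frequency dictionaries by destructive matching: it walks s2 once,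
-- removing one occurrence of each needed character from a pool of s1's characters (alternative decomposition, not faster).


-- ===== PORT A =====
-- 'dict[i] = 1 + dict.setdefault(i, 0)' : setdefault first (may append the key with 0), then overwrite
def scrambleCountStep (d : PySem.Dict Char Int) (i : Char) : PySem.Dict Char Int :=
  let d' := d.setdefault i 0
  d'.insert i (1 + d'.getD i 0)

-- the third loop, with its two early 'return False' branches
def scrambleCheck (dict1 : PySem.Dict Char Int) : List (Char × Int) → Bool
  | [] => true
  | (k, val) :: rest =>
    if dict1.contains k = false then false
    else if val > dict1.getD k 0 then false
    else scrambleCheck dict1 rest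

def scramble (s1 : String) (s2 : String) : Bool :=
  let dict1 := s1.toList.foldl scrambleCountStep PySem.Dict.empty
  let dict2 := s2.toList.foldl scrambleCountStep PySem.Dict.empty
  scrambleCheck dict1 dict2.items

-- ===== PORT B =====
-- the loop over s2: 'pool.remove(c)' succeeds (new pool) or raises ValueError ('return False')
def scrambleGo (pool : List Char) : List Char → Bool
  | [] => true
  | c :: rest =>
    match PySem.List.remove? pool c with
    | none => false
    | some pool' => scrambleGo pool' rest

def scramble_alt (s1 : String) (s2 : String) : Bool :=
  scrambleGo s1.toList s2.toList

-- ===== PRECONDITION & SPEC =====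
def Spec_scramble (s1 : String) (s2 : String) (out : Bool) : Prop := out = scramble_alt s1 s2
instance (s1 : String) (s2 : String) (out : Bool) : Decidable (Spec_scramble s1 s2 out) := by unfold Spec_scramble; infer_instance

-- ===== CLAIM (what is proved, stated in full; the proofs are below) =====
def Claim_equal_scramble : Prop := ∀ (s1 : String) (s2 : String), Dom_scramble s1 s2 → Spec_scramble s1 s2 (scramble s1 s2)

-- ===== LEMMAS AND PROOFS =====

-- A's counting step is extensionally the standard counter step
lemma scrambleCountStep_eq :
    scrambleCountStep = (fun (d : PySem.Dict Char Int) x => d.insert x (d.getD x 0 + 1)) := by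
  funext d x
  show (d.setdefault x 0).insert x (1 + (d.setdefault x 0).getD x 0) = _
  by_cases h : d.contains x = true
  · rw [PySem.Dict.setdefault_of_contains d 0 h, Int.add_comm]
  · rw [PySem.Dict.setdefault_of_not_contains d 0 (by simpa using h)]
    simp [PySem.Dict.getD_insert_self, PySem.Dict.insert_insert_self, pysem,
      (by simpa using h : d.contains x = false)]

lemma scrambleCheck_eq_all (d : PySem.Dict Char Int) (l : List (Char × Int)) :
    scrambleCheck d l = l.all (fun p => d.contains p.1 && decide (p.2 ≤ d.getD p.1 0)) := by
  induction l with
  | nil => rfl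
  | cons p rest ih =>
    obtain ⟨k, v⟩ := p
    rw [scrambleCheck, List.all_cons, ih]
    by_cases hc : d.contains k = true
    · by_cases hv : v > d.getD k 0
      · simp [hc, hv]
      · simp [hc, hv]
        omega
    · simp [(by simpa using hc : d.contains k = false)]

lemma all_congr_mem (l : List Char) (f g : Char → Bool) (h : ∀ x ∈ l, f x = g x) :
    l.all f = l.all g := by
  induction l with
  | nil => rfl
  | cons a t ih => simp [List.all_cons, h a (by simp), ih (fun x hx => h x (by simp [hx]))]

-- A returns true exactly when s1 has at least s2's count of every character
lemma scramble_eq_all (s1 s2 : String) :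
    scramble s1 s2 =
      (PySem.Set.ofList s2.toList).all (fun c => decide (s2.toList.count c ≤ s1.toList.count c)) := by
  unfold scramble
  rw [scrambleCountStep_eq, PySem.Dict.foldl_insert_getD_add_one_eq_counter,
    PySem.Dict.foldl_insert_getD_add_one_eq_counter, scrambleCheck_eq_all,
    PySem.Dict.items_counter, List.all_map]
  refine all_congr_mem _ _ _ (fun k hk => ?_)
  have hk2 : k ∈ s2.toList := (PySem.Set.mem_ofList _ _).mp hk
  simp only [Function.comp, PySem.Dict.contains_counter, PySem.Dict.getD_counter]
  by_cases h1 : k ∈ s1.toList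
  · simp [h1]
  · have h0 : s1.toList.count k = 0 := List.count_eq_zero.mpr h1
    have hp : 0 < s2.toList.count k := List.count_pos_iff.mpr hk2
    simp [h1, h0]
    omega

lemma scramble_eq_true_iff (s1 s2 : String) :
    scramble s1 s2 = true ↔ ∀ c : Char, s2.toList.count c ≤ s1.toList.count c := by
  rw [scramble_eq_all, List.all_eq_true]
  constructor
  · intro h c
    by_cases hc : c ∈ s2.toList
    · simpa using h c ((PySem.Set.mem_ofList _ _).mpr hc)
    · simp [List.count_eq_zero.mpr hc]
  · intro h c hc
    simpa using h c

-- B's destructive matching returns true under exactly the same condition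
lemma scrambleGo_eq_true_iff (l pool : List Char) :
    scrambleGo pool l = true ↔ ∀ c : Char, l.count c ≤ pool.count c := by
  induction l generalizing pool with
  | nil => simp [scrambleGo]
  | cons c rest ih =>
    rw [scrambleGo]
    by_cases hc : c ∈ pool
    · rw [PySem.List.remove?_eq_some_erase pool c hc]
      simp only []
      rw [ih]
      have hpos : 0 < pool.count c := List.count_pos_iff.mpr hc
      constructor
      · intro h d
        have hd := h d
        by_cases hdc : d = c
        · subst hdc
          rw [List.count_erase_self] at hd
          simp only [List.count_cons_self]
          omega
        · rw [List.count_erase_of_ne hdc] at hd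
          rw [List.count_cons_of_ne (Ne.symm hdc)]
          exact hd
      · intro h d
        by_cases hdc : d = c
        · subst hdc
          have hd := h d
          rw [List.count_erase_self]
          simp only [List.count_cons_self] at hd
          omega
        · have hd := h d
          rw [List.count_erase_of_ne hdc]
          rw [List.count_cons_of_ne (Ne.symm hdc)] at hd
          exact hd
    · rw [(PySem.List.remove?_eq_none_iff pool c).mpr hc]
      have h0 : pool.count c = 0 := List.count_eq_zero.mpr hc
      constructor
      · intro h
        exact nomatch h
      · intro h
        have hcc := h c
        rw [h0, List.count_cons_self] at hcc
        omega

-- ===== VERDICT (by name: the statement is the Claim_ definition above) =====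
theorem scramble_spec : Claim_equal_scramble := by
  intro s1 s2 _
  unfold Spec_scramble scramble_alt
  exact Bool.eq_iff_iff.mpr
    ((scramble_eq_true_iff s1 s2).trans (scrambleGo_eq_true_iff s2.toList s1.toList).symm)
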